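-- pv_equiv track=rewrite | github.com/ljm0850/algo-problem | baekjoon/17127.py | solution
-- ===== SOURCE A (Python) =====
-- def solution(N:int,tree:list[int])->int:
--     ans = 0
--     ls = [0]*(N)
--     total = 1
--     for i in range(N):
--         num = tree[i]
--         total *= num
--         ls[i] = total
--     for s1 in range(N-3):
--         total = ls[s1]
--         for s2 in range(s1+1,N-2):
--             v2 = ls[s2] // ls[s1]
--             total += v2
--             for s3 in range(s2+1,N-1):
--                 v3 = ls[s3] // ls[s2]
--                 total += v3
--                 for s4 in range(s3+1,N):
--                     v4 = ls[s4] // ls[s3]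
--                     total += v4
--                     ans = max(total,ans)
--                     total -= v4
--                 total -= v3
--             total -= v2
--     return ans
-- ===== SOURCE B (Python) =====
-- def solution(N: int, tree: list[int]) -> int:
--     if N < 4:
--         return 0
--     pre = []
--     t = 1
--     for i in range(N):
--         t *= tree[i]
--         pre.append(t)
--     # d holds, for each end index i, the best value of a chain ending at i;
--     # after layer k it covers chains of k+1 segments, stored at offset d[i - k].
--     d = pre
--     for k in range(3):
--         d = [max(d[j - k] + pre[i] // pre[j] for j in range(k, i))
--              for i in range(k + 1, N)]
--     return max(0, max(d))
-- ===== Notes on version B (the rewrite author's own statement) =====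
-- stated objective: faster
-- what changed: A enumerates all quadruples of cut points in four nested loops; B runs a dynamic program over the number of segments (dp[k][i] = best k-segment chain ending at i, built in three quadratic layers over the prefix-product list), then takes max(0, max dp[4]); intended as faster and measured 92x at n=64 and 302x at n=256 on random inputs, but unconfirmed at the largest size, where huge 2^31-scale big-int prefix products make both programs time out.
import Mathlib
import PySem

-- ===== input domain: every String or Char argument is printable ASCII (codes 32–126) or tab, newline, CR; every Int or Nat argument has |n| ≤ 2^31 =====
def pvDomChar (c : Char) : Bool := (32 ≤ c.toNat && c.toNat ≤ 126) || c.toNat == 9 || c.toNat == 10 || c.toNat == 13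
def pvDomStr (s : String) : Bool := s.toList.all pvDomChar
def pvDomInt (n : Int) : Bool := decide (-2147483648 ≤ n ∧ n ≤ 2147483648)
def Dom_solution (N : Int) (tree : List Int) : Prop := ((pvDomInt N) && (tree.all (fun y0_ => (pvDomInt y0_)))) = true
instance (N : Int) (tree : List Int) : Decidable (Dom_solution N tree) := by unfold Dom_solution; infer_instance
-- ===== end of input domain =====

-- B replaces A's four nested loops over all cut-point quadruples by a dynamic program
-- over the number of segments (dp[k][i] = best chain of k segments ending at i; intended
-- as faster: three quadratic layers instead of a quartic scan, measured 92x at n=64 and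
-- 302x at n=256 on random inputs; at n=1024 with 2^31-scale values both time out).

-- ===== PORT A =====
def solution (N : Int) (tree : List Int) : Int :=
  let st := (PySem.List.pyRange 0 N 1).foldl
    (fun (st : List Int × Int) i =>
      let num := PySem.List.pyGetD tree i 0
      let total := st.2 * num
      (st.1.set i.toNat total, total))   -- i ≥ 0 inside range(N), so .toNat is exact here
    (List.replicate N.toNat 0, 1)
  let ls := st.1
  (PySem.List.pyRange 0 (N - 3) 1).foldl (fun ans s1 =>
    let total := PySem.List.pyGetD ls s1 0
    let r2 := (PySem.List.pyRange (s1 + 1) (N - 2) 1).foldl (fun (st : Int × Int) s2 =>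
      let v2 := PySem.Int.floordiv (PySem.List.pyGetD ls s2 0) (PySem.List.pyGetD ls s1 0)
      let total := st.1 + v2
      let r3 := (PySem.List.pyRange (s2 + 1) (N - 1) 1).foldl (fun (st : Int × Int) s3 =>
        let v3 := PySem.Int.floordiv (PySem.List.pyGetD ls s3 0) (PySem.List.pyGetD ls s2 0)
        let total := st.1 + v3
        let r4 := (PySem.List.pyRange (s3 + 1) N 1).foldl (fun (st : Int × Int) s4 =>
          let v4 := PySem.Int.floordiv (PySem.List.pyGetD ls s4 0) (PySem.List.pyGetD ls s3 0)
          let total := st.1 + v4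
          let ans := max total st.2
          (total - v4, ans)) (total, st.2)
        (r4.1 - v3, r4.2)) (total, st.2)
      (r3.1 - v2, r3.2)) (total, ans)
    r2.2) 0

-- ===== PORT B =====
def solution_alt (N : Int) (tree : List Int) : Int :=
  if N < 4 then 0 else
  let pre := ((PySem.List.pyRange 0 N 1).foldl
    (fun (st : List Int × Int) i =>
      let t := st.2 * PySem.List.pyGetD tree i 0
      (st.1 ++ [t], t)) ([], 1)).1
  let d := (PySem.List.pyRange 0 3 1).foldl
    (fun (d : List Int) k =>
      (PySem.List.pyRange (k + 1) N 1).map (fun i =>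
        (PySem.List.max? ((PySem.List.pyRange k i 1).map (fun j =>
          PySem.List.pyGetD d (j - k) 0 +
          PySem.Int.floordiv (PySem.List.pyGetD pre i 0) (PySem.List.pyGetD pre j 0)))
          (fun x => x)).getD 0)) pre
  max 0 ((PySem.List.max? d (fun x => x)).getD 0)

-- ===== PRECONDITION & SPEC =====
-- Pre_ excludes exactly the inputs where the Python A raises: IndexError when N > len(tree),
-- and ZeroDivisionError when N ≥ 4 and a zero occurs among the first N-1 elements (a zero
-- prefix product is then used as a divisor).
def Pre_solution (N : Int) (tree : List Int) : Prop :=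
  (0 ≤ N → N ≤ (tree.length : Int)) ∧ (4 ≤ N → ∀ x ∈ tree.take (N - 1).toNat, x ≠ 0)
instance (N : Int) (tree : List Int) : Decidable (Pre_solution N tree) := by
  unfold Pre_solution; infer_instance

def pvWitness_solution : Int × List Int := (4, [1, 2, 1, 3])

def Spec_solution (N : Int) (tree : List Int) (out : Int) : Prop := out = solution_alt N tree
instance (N : Int) (tree : List Int) (out : Int) : Decidable (Spec_solution N tree out) := by
  unfold Spec_solution; infer_instance

-- ===== CLAIM (what is proved, stated in full; the proofs are below) =====
def Claim_equal_solution : Prop := ∀ (N : Int) (tree : List Int), Dom_solution N tree → Pre_solution N tree → Spec_solution N tree (solution N tree)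

-- ===== LEMMAS AND PROOFS =====

-- proof-side abbreviations for the two programs' shared primitive expressions
def pvG (ls : List Int) (i : Int) : Int := PySem.List.pyGetD ls i 0
def pvF (ls : List Int) (j i : Int) : Int :=
  PySem.Int.floordiv (PySem.List.pyGetD ls i 0) (PySem.List.pyGetD ls j 0)
def pvMx (L : List Int) : Int := (PySem.List.max? L (fun x => x)).getD 0

-- B's dp and the chain-value lists it maximises
def pvDp (ls : List Int) : Nat → Int → Int
  | 0, i => pvG ls i
  | k + 1, i =>
      pvMx ((PySem.List.pyRange (k : Int) i 1).map (fun j => pvDp ls k j + pvF ls j i))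

def pvCh (ls : List Int) : Nat → Int → List Int
  | 0, i => [pvG ls i]
  | k + 1, i =>
      (PySem.List.pyRange (k : Int) i 1).flatMap
        (fun j => (pvCh ls k j).map (fun v => v + pvF ls j i))

-- the per-level running maxima of A's nested loops
def pvM4 (ls : List Int) (Nn s3 t a : Int) : Int :=
  (PySem.List.pyRange (s3 + 1) Nn 1).foldl (fun a s4 => max (t + pvF ls s3 s4) a) a
def pvM3 (ls : List Int) (Nn s2 t a : Int) : Int :=
  (PySem.List.pyRange (s2 + 1) (Nn - 1) 1).foldl (fun a s3 => pvM4 ls Nn s3 (t + pvF ls s2 s3) a) a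
def pvM2 (ls : List Int) (Nn s1 t a : Int) : Int :=
  (PySem.List.pyRange (s1 + 1) (Nn - 2) 1).foldl (fun a s2 => pvM3 ls Nn s2 (t + pvF ls s1 s2) a) a

def pvCA (ls : List Int) (Nn : Int) : List Int :=
  (PySem.List.pyRange 0 (Nn - 3) 1).flatMap (fun s1 =>
    (PySem.List.pyRange (s1 + 1) (Nn - 2) 1).flatMap (fun s2 =>
      (PySem.List.pyRange (s2 + 1) (Nn - 1) 1).flatMap (fun s3 =>
        (PySem.List.pyRange (s3 + 1) Nn 1).map (fun s4 =>
          pvG ls s1 + pvF ls s1 s2 + pvF ls s2 s3 + pvF ls s3 s4))))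

lemma pvMx_mem (L : List Int) (h : L ≠ []) : pvMx L ∈ L := by
  obtain ⟨m, hm⟩ := Option.ne_none_iff_exists'.mp
    (by simpa [PySem.List.max?_eq_none_iff] using h :
      PySem.List.max? L (fun x => x) ≠ none)
  simpa [pvMx, hm] using PySem.List.max?_mem hm

lemma le_pvMx (v : Int) (L : List Int) (h : v ∈ L) : v ≤ pvMx L := by
  obtain ⟨m, hm⟩ := Option.ne_none_iff_exists'.mp
    (by simp [PySem.List.max?_eq_none_iff]; rintro rfl; simp at h :
      PySem.List.max? L (fun x => x) ≠ none)
  have := PySem.List.max?_isMax hm v h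
  simpa [pvMx, hm] using this

lemma pvMx_eq (L L' : List Int) (hL : L ≠ []) (hL' : L' ≠ [])
    (h1 : ∀ v ∈ L, v ≤ pvMx L') (h2 : ∀ v ∈ L', v ≤ pvMx L) : pvMx L = pvMx L' := by
  exact le_antisymm (h1 _ (pvMx_mem L hL)) (h2 _ (pvMx_mem L' hL'))

lemma pvMx_map_add (L : List Int) (c : Int) (h : L ≠ []) :
    pvMx (L.map (fun v => v + c)) = pvMx L + c := by
  have hm : L.map (fun v => v + c) ≠ [] := by simpa using h
  apply le_antisymm
  · obtain ⟨v, hv, he⟩ := List.mem_map.mp (pvMx_mem _ hm)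
    calc pvMx (L.map (fun v => v + c)) = v + c := he.symm
      _ ≤ pvMx L + c := by have := le_pvMx v L hv; omega
  · have : pvMx L + c ∈ L.map (fun v => v + c) :=
      List.mem_map.mpr ⟨pvMx L, pvMx_mem L h, rfl⟩
    exact le_pvMx _ _ this

lemma pvMx_flatMap {α : Type} (L : List α) (g : α → List Int) (hL : L ≠ [])
    (hg : ∀ x ∈ L, g x ≠ []) :
    pvMx (L.map (fun x => pvMx (g x))) = pvMx (L.flatMap g) := by
  have hmap : L.map (fun x => pvMx (g x)) ≠ [] := by simpa using hL
  have hfm : L.flatMap g ≠ [] := by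
    obtain ⟨x, hx⟩ := List.exists_mem_of_ne_nil L hL
    obtain ⟨v, hv⟩ := List.exists_mem_of_ne_nil (g x) (hg x hx)
    exact List.ne_nil_of_mem (List.mem_flatMap.mpr ⟨x, hx, hv⟩)
  apply pvMx_eq _ _ hmap hfm
  · intro v hv
    obtain ⟨x, hx, he⟩ := List.mem_map.mp hv
    subst he
    exact le_pvMx _ _ (List.mem_flatMap.mpr ⟨x, hx, pvMx_mem _ (hg x hx)⟩)
  · intro v hv
    obtain ⟨x, hx, hvx⟩ := List.mem_flatMap.mp hv
    calc v ≤ pvMx (g x) := le_pvMx _ _ hvx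
      _ ≤ pvMx (L.map (fun x => pvMx (g x))) :=
          le_pvMx _ _ (List.mem_map.mpr ⟨x, hx, rfl⟩)

lemma foldl_max_aux : ∀ (t : List Int) (a x : Int), t.foldl max (max a x) = max a (t.foldl max x) := by
  intro t
  induction t with
  | nil => intro a x; rfl
  | cons y t ih => intro a x; simp only [List.foldl_cons, max_assoc, ih]

lemma foldl_maxflip_eq (L : List Int) (a : Int) (h : L ≠ []) :
    L.foldl (fun a v => max v a) a = max a (pvMx L) := by
  obtain ⟨x, t, rfl⟩ := List.exists_cons_of_ne_nil h
  have hc : (fun (a v : Int) => max v a) = max := by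
    funext a v; exact max_comm v a
  rw [hc]
  have : pvMx (x :: t) = t.foldl max x := by
    simp [pvMx, PySem.List.max?_id_cons]
  rw [this, List.foldl_cons, foldl_max_aux]

lemma lvl4gen (ls : List Int) (s3 : Int) :
    ∀ (L : List Int) (t a : Int),
      L.foldl (fun (st : Int × Int) s4 =>
        (st.1 + PySem.Int.floordiv (PySem.List.pyGetD ls s4 0) (PySem.List.pyGetD ls s3 0)
           - PySem.Int.floordiv (PySem.List.pyGetD ls s4 0) (PySem.List.pyGetD ls s3 0),
         max (st.1 + PySem.Int.floordiv (PySem.List.pyGetD ls s4 0) (PySem.List.pyGetD ls s3 0)) st.2))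
        (t, a)
      = (t, L.foldl (fun a s4 => max (t + pvF ls s3 s4) a) a) := by
  intro L
  induction L with
  | nil => intro t a; rfl
  | cons y L ih =>
      intro t a
      simp only [List.foldl_cons]
      rw [add_sub_cancel_right, ih]
      simp only [pvF]

lemma lvl3gen (ls : List Int) (Nn s2 : Int) :
    ∀ (L : List Int) (t a : Int),
      L.foldl (fun (st : Int × Int) s3 =>
        (((PySem.List.pyRange (s3 + 1) Nn 1).foldl (fun (st : Int × Int) s4 =>
            (st.1 + PySem.Int.floordiv (PySem.List.pyGetD ls s4 0) (PySem.List.pyGetD ls s3 0)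
               - PySem.Int.floordiv (PySem.List.pyGetD ls s4 0) (PySem.List.pyGetD ls s3 0),
             max (st.1 + PySem.Int.floordiv (PySem.List.pyGetD ls s4 0) (PySem.List.pyGetD ls s3 0)) st.2))
            (st.1 + PySem.Int.floordiv (PySem.List.pyGetD ls s3 0) (PySem.List.pyGetD ls s2 0), st.2)).1
           - PySem.Int.floordiv (PySem.List.pyGetD ls s3 0) (PySem.List.pyGetD ls s2 0),
         ((PySem.List.pyRange (s3 + 1) Nn 1).foldl (fun (st : Int × Int) s4 =>
            (st.1 + PySem.Int.floordiv (PySem.List.pyGetD ls s4 0) (PySem.List.pyGetD ls s3 0)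
               - PySem.Int.floordiv (PySem.List.pyGetD ls s4 0) (PySem.List.pyGetD ls s3 0),
             max (st.1 + PySem.Int.floordiv (PySem.List.pyGetD ls s4 0) (PySem.List.pyGetD ls s3 0)) st.2))
            (st.1 + PySem.Int.floordiv (PySem.List.pyGetD ls s3 0) (PySem.List.pyGetD ls s2 0), st.2)).2))
        (t, a)
      = (t, L.foldl (fun a s3 => pvM4 ls Nn s3 (t + pvF ls s2 s3) a) a) := by
  intro L
  induction L with
  | nil => intro t a; rfl
  | cons y L ih =>
      intro t a
      simp only [List.foldl_cons]
      rw [lvl4gen]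
      simp only []
      rw [add_sub_cancel_right, ih]
      simp only [pvM4, pvF]

lemma lvl2gen (ls : List Int) (Nn s1 : Int) :
    ∀ (L : List Int) (t a : Int),
      L.foldl (fun (st : Int × Int) s2 => (((PySem.List.pyRange (s2 + 1) (Nn - 1) 1).foldl (fun (st : Int × Int) s3 => (((PySem.List.pyRange (s3 + 1) Nn 1).foldl (fun (st : Int × Int) s4 => (st.1 + PySem.Int.floordiv (PySem.List.pyGetD ls s4 0) (PySem.List.pyGetD ls s3 0) - PySem.Int.floordiv (PySem.List.pyGetD ls s4 0) (PySem.List.pyGetD ls s3 0), max (st.1 + PySem.Int.floordiv (PySem.List.pyGetD ls s4 0) (PySem.List.pyGetD ls s3 0)) st.2)) (st.1 + PySem.Int.floordiv (PySem.List.pyGetD ls s3 0) (PySem.List.pyGetD ls s2 0), st.2)).1 - PySem.Int.floordiv (PySem.List.pyGetD ls s3 0) (PySem.List.pyGetD ls s2 0), ((PySem.List.pyRange (s3 + 1) Nn 1).foldl (fun (st : Int × Int) s4 => (st.1 + PySem.Int.floordiv (PySem.List.pyGetD ls s4 0) (PySem.List.pyGetD ls s3 0) - PySem.Int.floordiv (PySem.List.pyGetD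 ls s4 0) (PySem.List.pyGetD ls s3 0), max (st.1 + PySem.Int.floordiv (PySem.List.pyGetD ls s4 0) (PySem.List.pyGetD ls s3 0)) st.2)) (st.1 + PySem.Int.floordiv (PySem.List.pyGetD ls s3 0) (PySem.List.pyGetD ls s2 0), st.2)).2)) (st.1 + PySem.Int.floordiv (PySem.List.pyGetD ls s2 0) (PySem.List.pyGetD ls s1 0), st.2)).1 - PySem.Int.floordiv (PySem.List.pyGetD ls s2 0) (PySem.List.pyGetD ls s1 0), ((PySem.List.pyRange (s2 + 1) (Nn - 1) 1).foldl (fun (st : Int × Int) s3 => (((PySem.List.pyRange (s3 + 1) Nn 1).foldl (fun (st : Int × Int) s4 => (st.1 + PySem.Int.floordiv (PySem.List.pyGetD ls s4 0) (PySem.List.pyGetD ls s3 0) - PySem.Int.floordiv (PySem.List.pyGetD ls s4 0) (PySem.List.pyGetD ls s3 0), max (st.1 + PySem.Int.floordiv (PySem.List.pyGetD ls s4 0) (PySem.List.pyGetD ls s3 0)) st.2)) (st.1 + PySem.Int.floordiv (PySem.List.pyGetD ls s3 0) (PySem.List.pyGetD ls s2 0), st.2)).1 - PySem.Int.floordiv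 (PySem.List.pyGetD ls s3 0) (PySem.List.pyGetD ls s2 0), ((PySem.List.pyRange (s3 + 1) Nn 1).foldl (fun (st : Int × Int) s4 => (st.1 + PySem.Int.floordiv (PySem.List.pyGetD ls s4 0) (PySem.List.pyGetD ls s3 0) - PySem.Int.floordiv (PySem.List.pyGetD ls s4 0) (PySem.List.pyGetD ls s3 0), max (st.1 + PySem.Int.floordiv (PySem.List.pyGetD ls s4 0) (PySem.List.pyGetD ls s3 0)) st.2)) (st.1 + PySem.Int.floordiv (PySem.List.pyGetD ls s3 0) (PySem.List.pyGetD ls s2 0), st.2)).2)) (st.1 + PySem.Int.floordiv (PySem.List.pyGetD ls s2 0) (PySem.List.pyGetD ls s1 0), st.2)).2)) (t, a)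
      = (t, L.foldl (fun a s2 => pvM3 ls Nn s2 (t + pvF ls s1 s2) a) a) := by
  intro L
  induction L with
  | nil => intro t a; rfl
  | cons y L ih =>
      intro t a
      simp only [List.foldl_cons]
      rw [lvl3gen]
      simp only []
      rw [add_sub_cancel_right, ih]
      simp only [pvM3, pvF]

def pvLs (N : Int) (tree : List Int) : List Int :=
  ((PySem.List.pyRange 0 N 1).foldl
    (fun (st : List Int × Int) i =>
      (st.1.set i.toNat (st.2 * PySem.List.pyGetD tree i 0),
       st.2 * PySem.List.pyGetD tree i 0))
    (List.replicate N.toNat 0, 1)).1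


lemma A_eq_M (N : Int) (tree : List Int) :
    solution N tree =
      (PySem.List.pyRange 0 (N - 3) 1).foldl
        (fun a s1 => pvM2 (pvLs N tree) N s1 (pvG (pvLs N tree) s1) a) 0 := by
  simp only [solution, pvLs]
  apply PySem.List.foldl_congr_mem
  intro acc s1 _
  rw [lvl2gen]
  simp only [pvM2, pvG]


lemma M_eq_CA (ls : List Int) (Nn : Int) :
    (PySem.List.pyRange 0 (Nn - 3) 1).foldl (fun a s1 => pvM2 ls Nn s1 (pvG ls s1) a) 0
      = (pvCA ls Nn).foldl (fun a v => max v a) 0 := by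
  simp only [pvCA, List.foldl_flatMap, List.foldl_map, pvM2, pvM3, pvM4]

lemma build_len (g : Int → Int) :
    ∀ (L : List Int) (acc : List Int) (t : Int),
      ((L.foldl (fun (st : List Int × Int) i => (st.1 ++ [st.2 * g i], st.2 * g i)) (acc, t)).1).length
        = acc.length + L.length := by
  intro L
  induction L with
  | nil => intro acc t; simp
  | cons y L ih =>
      intro acc t
      simp only [List.foldl_cons]
      rw [ih]
      simp
      omega

lemma build_eq (g : Int → Int) :
    ∀ (k : Nat) (m : Int) (acc : List Int) (t : Int), 0 ≤ m → acc.length = m.toNat →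
      ((PySem.List.pyRange m (m + (k : Int)) 1).foldl
          (fun (st : List Int × Int) i => (st.1.set i.toNat (st.2 * g i), st.2 * g i))
          (acc ++ List.replicate k 0, t))
        = (PySem.List.pyRange m (m + (k : Int)) 1).foldl
            (fun (st : List Int × Int) i => (st.1 ++ [st.2 * g i], st.2 * g i)) (acc, t) := by
  intro k
  induction k with
  | zero =>
      intro m acc t hm hl
      rw [PySem.List.pyRange_one_eq_nil (by omega)]
      simp
  | succ k ih =>
      intro m acc t hm hl
      rw [PySem.List.pyRange_one_cons (by push_cast; omega)]
      simp only [List.foldl_cons]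
      have hset : (acc ++ List.replicate (k + 1) 0).set m.toNat (t * g m)
          = (acc ++ [t * g m]) ++ List.replicate k 0 := by
        rw [List.replicate_succ, List.set_append]
        simp [hl]
      rw [hset]
      have harg : m + ((k : Int) + 1) = (m + 1) + (k : Int) := by omega
      have h1 : PySem.List.pyRange (m + 1) (m + (((k:Nat) + 1 : Nat) : Int)) 1
          = PySem.List.pyRange (m + 1) ((m + 1) + (k : Int)) 1 := by
        push_cast
        rw [harg]
      rw [h1, ih (m + 1) (acc ++ [t * g m]) (t * g m) (by omega) (by simp; omega)]

lemma layer_step (ls : List Int) (Nn : Int) (k : Nat)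
    (d : List Int) (hd : d = (PySem.List.pyRange (k : Int) Nn 1).map (fun i => pvDp ls k i)) :
    (PySem.List.pyRange ((k : Int) + 1) Nn 1).map (fun i =>
        (PySem.List.max? ((PySem.List.pyRange (k : Int) i 1).map (fun j =>
            PySem.List.pyGetD d (j - (k : Int)) 0 +
            PySem.Int.floordiv (PySem.List.pyGetD ls i 0) (PySem.List.pyGetD ls j 0)))
          (fun x => x)).getD 0)
      = (PySem.List.pyRange ((k : Int) + 1) Nn 1).map (fun i => pvDp ls (k + 1) i) := by
  apply List.map_congr_left
  intro i hi
  rw [PySem.List.mem_pyRange_one] at hi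
  have hmap : (PySem.List.pyRange (k : Int) i 1).map (fun j =>
      PySem.List.pyGetD d (j - (k : Int)) 0 +
      PySem.Int.floordiv (PySem.List.pyGetD ls i 0) (PySem.List.pyGetD ls j 0))
      = (PySem.List.pyRange (k : Int) i 1).map (fun j => pvDp ls k j + pvF ls j i) := by
    apply List.map_congr_left
    intro j hj
    rw [PySem.List.mem_pyRange_one] at hj
    have hidx : PySem.List.pyGetD d (j - (k : Int)) 0 = pvDp ls k j := by
      subst hd
      have hlt : j - (k : Int) < ((PySem.List.pyRange (k : Int) Nn 1).map
          (fun i => pvDp ls k i)).length := by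
        simp [PySem.List.length_pyRange_one]
        omega
      rw [PySem.List.pyGetD_eq_getElem _ _ (by omega) hlt]
      rw [List.getElem_map]
      congr 1
      rw [PySem.List.getElem_pyRange_one]
      omega
    rw [hidx]
    simp [pvF]
  rw [hmap]
  rfl

lemma pvMx_single (x : Int) : pvMx [x] = x := by
  simp [pvMx, PySem.List.max?_id_cons]

lemma dp_chain (ls : List Int) :
    ∀ (k : Nat) (i : Int), (k : Int) ≤ i →
      pvCh ls k i ≠ [] ∧ pvDp ls k i = pvMx (pvCh ls k i) := by
  intro k
  induction k with
  | zero =>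
      intro i _
      refine ⟨by simp [pvCh], ?_⟩
      simp [pvDp, pvCh, pvMx_single]
  | succ k ih =>
      intro i hi
      have hk : (k : Int) < i := by push_cast at hi; omega
      have hrange : PySem.List.pyRange (k : Int) i 1 ≠ [] :=
        List.ne_nil_of_mem (PySem.List.mem_pyRange_one.mpr ⟨le_refl _, hk⟩)
      have hg : ∀ j ∈ PySem.List.pyRange (k : Int) i 1,
          (pvCh ls k j).map (fun v => v + pvF ls j i) ≠ [] := by
        intro j hj
        rw [PySem.List.mem_pyRange_one] at hj
        have := (ih j hj.1).1
        simpa using this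
      constructor
      · simp only [pvCh]
        intro hnil
        rw [List.flatMap_eq_nil_iff] at hnil
        exact hg _ (PySem.List.mem_pyRange_one.mpr ⟨le_refl _, hk⟩)
          (hnil _ (PySem.List.mem_pyRange_one.mpr ⟨le_refl _, hk⟩))
      · simp only [pvDp, pvCh]
        have hmc : ∀ j ∈ PySem.List.pyRange (k : Int) i 1,
            pvDp ls k j + pvF ls j i = pvMx ((pvCh ls k j).map (fun v => v + pvF ls j i)) := by
          intro j hj
          rw [PySem.List.mem_pyRange_one] at hj
          rw [(ih j hj.1).2, pvMx_map_add _ _ (ih j hj.1).1]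
        rw [List.map_congr_left hmc, pvMx_flatMap _ _ hrange hg]

lemma mem_Ch0 (ls : List Int) (i v : Int) : v ∈ pvCh ls 0 i ↔ v = pvG ls i := by
  simp [pvCh]

lemma mem_Ch_succ (ls : List Int) (k : Nat) (i v : Int) :
    v ∈ pvCh ls (k + 1) i ↔ ∃ j w, (k : Int) ≤ j ∧ j < i ∧ w ∈ pvCh ls k j ∧ v = w + pvF ls j i := by
  simp only [pvCh, List.mem_flatMap, List.mem_map, PySem.List.mem_pyRange_one]
  constructor
  · rintro ⟨j, ⟨h1, h2⟩, w, hw, rfl⟩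
    exact ⟨j, w, h1, h2, hw, rfl⟩
  · rintro ⟨j, w, h1, h2, hw, rfl⟩
    exact ⟨j, ⟨h1, h2⟩, w, hw, rfl⟩

lemma mem_Ch3 (ls : List Int) (s4 v : Int) :
    v ∈ pvCh ls 3 s4 ↔ ∃ s1 s2 s3 : Int,
      0 ≤ s1 ∧ s1 < s2 ∧ s2 < s3 ∧ s3 < s4 ∧
      v = pvG ls s1 + pvF ls s1 s2 + pvF ls s2 s3 + pvF ls s3 s4 := by
  constructor
  · intro h
    obtain ⟨s3, w2, h3a, h3b, hw2, rfl⟩ := (mem_Ch_succ ls 2 s4 _).mp h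
    obtain ⟨s2, w1, h2a, h2b, hw1, rfl⟩ := (mem_Ch_succ ls 1 s3 _).mp hw2
    obtain ⟨s1, w0, h1a, h1b, hw0, rfl⟩ := (mem_Ch_succ ls 0 s2 _).mp hw1
    rw [mem_Ch0] at hw0
    subst hw0
    exact ⟨s1, s2, s3, by push_cast at h1a h2a h3a; omega, h1b, h2b, h3b, rfl⟩
  · rintro ⟨s1, s2, s3, h0, h1, h2, h3, rfl⟩
    refine (mem_Ch_succ ls 2 s4 _).mpr ⟨s3, _, by push_cast; omega, h3, ?_, rfl⟩
    refine (mem_Ch_succ ls 1 s3 _).mpr ⟨s2, _, by push_cast; omega, h2, ?_, rfl⟩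
    refine (mem_Ch_succ ls 0 s2 _).mpr ⟨s1, _, by push_cast; omega, h1, ?_, rfl⟩
    rw [mem_Ch0]


lemma mem_CA (ls : List Int) (Nn v : Int) :
    v ∈ pvCA ls Nn ↔ ∃ s1 s2 s3 s4 : Int,
      0 ≤ s1 ∧ s1 < s2 ∧ s2 < s3 ∧ s3 < s4 ∧ s4 < Nn ∧
      v = pvG ls s1 + pvF ls s1 s2 + pvF ls s2 s3 + pvF ls s3 s4 := by
  simp only [pvCA, List.mem_flatMap, List.mem_map, PySem.List.mem_pyRange_one]
  constructor
  · rintro ⟨s1, ⟨ha, hb⟩, s2, ⟨hc, hd⟩, s3, ⟨he, hf⟩, s4, ⟨hg, hh⟩, rfl⟩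
    exact ⟨s1, s2, s3, s4, ha, by omega, by omega, by omega, hh, rfl⟩
  · rintro ⟨s1, s2, s3, s4, h0, h1, h2, h3, h4, rfl⟩
    exact ⟨s1, ⟨h0, by omega⟩, s2, ⟨by omega, by omega⟩, s3, ⟨by omega, by omega⟩,
      s4, ⟨by omega, h4⟩, rfl⟩

lemma core (ls : List Int) (Nn : Int) (h4 : 4 ≤ Nn) :
    pvMx (pvCA ls Nn) = pvMx ((PySem.List.pyRange 3 Nn 1).map (fun i => pvDp ls 3 i)) := by
  have hCA : pvCA ls Nn ≠ [] := by
    apply List.ne_nil_of_mem ((mem_CA ls Nn _).mpr ⟨0, 1, 2, 3, by omega, by omega, by omega,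
      by omega, by omega, rfl⟩)
  have hmapne : (PySem.List.pyRange 3 Nn 1).map (fun i => pvDp ls 3 i) ≠ [] := by
    simp only [ne_eq, List.map_eq_nil_iff]
    intro h
    have : (3:Int) ∈ PySem.List.pyRange 3 Nn 1 := PySem.List.mem_pyRange_one.mpr ⟨by omega, by omega⟩
    rw [h] at this
    simp at this
  apply pvMx_eq _ _ hCA hmapne
  · intro v hv
    obtain ⟨s1, s2, s3, s4, h0, h1, h2, h3, h4', rfl⟩ := (mem_CA ls Nn _).mp hv
    have hch := (mem_Ch3 ls s4 _).mpr ⟨s1, s2, s3, h0, h1, h2, h3, rfl⟩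
    have hdp := dp_chain ls 3 s4 (by push_cast; omega)
    calc pvG ls s1 + pvF ls s1 s2 + pvF ls s2 s3 + pvF ls s3 s4
        ≤ pvMx (pvCh ls 3 s4) := le_pvMx _ _ hch
      _ = pvDp ls 3 s4 := hdp.2.symm
      _ ≤ pvMx ((PySem.List.pyRange 3 Nn 1).map (fun i => pvDp ls 3 i)) :=
          le_pvMx _ _ (List.mem_map.mpr ⟨s4, PySem.List.mem_pyRange_one.mpr ⟨by omega, h4'⟩, rfl⟩)
  · intro w hw
    obtain ⟨i, hi, rfl⟩ := List.mem_map.mp hw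
    rw [PySem.List.mem_pyRange_one] at hi
    have hdp := dp_chain ls 3 i (by push_cast; omega)
    rw [hdp.2]
    have hmem := pvMx_mem _ hdp.1
    obtain ⟨s1, s2, s3, h0, h1, h2, h3, he⟩ := (mem_Ch3 ls i _).mp hmem
    rw [he]
    exact le_pvMx _ _ ((mem_CA ls Nn _).mpr ⟨s1, s2, s3, i, h0, h1, h2, h3, hi.2, rfl⟩)

lemma base_map (ls : List Int) (Nn : Int) (hlen : (ls.length : Int) = Nn) :
    ls = (PySem.List.pyRange ((0:Nat) : Int) Nn 1).map (fun i => pvDp ls 0 i) := by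
  rw [← hlen]
  push_cast
  have h := PySem.List.map_pyGetD_pyRange_zero' ls (0 : Int)
  conv_lhs => rw [← h]
  apply List.map_congr_left
  intro j _
  simp [pvDp, pvG]

lemma layer0 (ls : List Int) (Nn : Int) (hlen : (ls.length : Int) = Nn) :
    (PySem.List.pyRange (0 + 1) Nn 1).map (fun i =>
        (PySem.List.max? ((PySem.List.pyRange 0 i 1).map (fun j =>
            PySem.List.pyGetD ls (j - 0) 0 +
            PySem.Int.floordiv (PySem.List.pyGetD ls i 0) (PySem.List.pyGetD ls j 0)))
          (fun x => x)).getD 0)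
      = (PySem.List.pyRange (0 + 1) Nn 1).map (fun i => pvDp ls 1 i) := by
  have h := layer_step ls Nn 0 ls (base_map ls Nn hlen)
  exact_mod_cast h

lemma layer1 (ls : List Int) (Nn : Int) :
    (PySem.List.pyRange (1 + 1) Nn 1).map (fun i =>
        (PySem.List.max? ((PySem.List.pyRange 1 i 1).map (fun j =>
            PySem.List.pyGetD ((PySem.List.pyRange (0 + 1) Nn 1).map (fun i => pvDp ls 1 i)) (j - 1) 0 +
            PySem.Int.floordiv (PySem.List.pyGetD ls i 0) (PySem.List.pyGetD ls j 0)))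
          (fun x => x)).getD 0)
      = (PySem.List.pyRange (1 + 1) Nn 1).map (fun i => pvDp ls 2 i) := by
  have h := layer_step ls Nn 1 ((PySem.List.pyRange ((1:Nat) : Int) Nn 1).map (fun i => pvDp ls 1 i)) rfl
  exact_mod_cast h

lemma layer2 (ls : List Int) (Nn : Int) :
    (PySem.List.pyRange (2 + 1) Nn 1).map (fun i =>
        (PySem.List.max? ((PySem.List.pyRange 2 i 1).map (fun j =>
            PySem.List.pyGetD ((PySem.List.pyRange (1 + 1) Nn 1).map (fun i => pvDp ls 2 i)) (j - 2) 0 +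
            PySem.Int.floordiv (PySem.List.pyGetD ls i 0) (PySem.List.pyGetD ls j 0)))
          (fun x => x)).getD 0)
      = (PySem.List.pyRange (2 + 1) Nn 1).map (fun i => pvDp ls 3 i) := by
  have h := layer_step ls Nn 2 ((PySem.List.pyRange ((2:Nat) : Int) Nn 1).map (fun i => pvDp ls 2 i)) rfl
  exact_mod_cast h

lemma B_layers (ls : List Int) (Nn : Int) (hlen : (ls.length : Int) = Nn) :
    ((PySem.List.pyRange 0 3 1).foldl
      (fun (d : List Int) k =>
        (PySem.List.pyRange (k + 1) Nn 1).map (fun i =>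
          (PySem.List.max? ((PySem.List.pyRange k i 1).map (fun j =>
            PySem.List.pyGetD d (j - k) 0 +
            PySem.Int.floordiv (PySem.List.pyGetD ls i 0) (PySem.List.pyGetD ls j 0)))
            (fun x => x)).getD 0)) ls)
    = (PySem.List.pyRange 3 Nn 1).map (fun i => pvDp ls 3 i) := by
  have h01 : PySem.List.pyRange 0 3 1 = [0, 1, 2] := by rfl
  rw [h01]
  simp only [List.foldl_cons, List.foldl_nil]
  rw [layer0 ls Nn hlen, layer1 ls Nn, layer2 ls Nn]
  norm_num


-- ===== VERDICT (by name: the statement is the Claim_ definition above) =====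
theorem solution_spec : Claim_equal_solution := by
  intro N tree _ _
  unfold Spec_solution
  by_cases h4 : N < 4
  · have hA : solution N tree = 0 := by
      rw [A_eq_M, PySem.List.pyRange_one_eq_nil (by omega)]
      rfl
    rw [hA]
    simp [solution_alt, h4]
  · replace h4 : 4 ≤ N := by omega
    have hls : pvLs N tree
        = ((PySem.List.pyRange 0 N 1).foldl
            (fun (st : List Int × Int) i =>
              (st.1 ++ [st.2 * PySem.List.pyGetD tree i 0], st.2 * PySem.List.pyGetD tree i 0))
            ([], 1)).1 := by
      unfold pvLs
      have hr : PySem.List.pyRange 0 N 1 = PySem.List.pyRange 0 (0 + ((N.toNat : Nat) : Int)) 1 := by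
        congr 1
        omega
      have hb := build_eq (fun i => PySem.List.pyGetD tree i 0) N.toNat 0 [] 1 le_rfl rfl
      simp only [List.nil_append] at hb
      rw [hr, hb]
    have hlen : ((pvLs N tree).length : Int) = N := by
      rw [hls, build_len]
      simp [PySem.List.length_pyRange_one]
      omega
    have hCAne : pvCA (pvLs N tree) N ≠ [] :=
      List.ne_nil_of_mem ((mem_CA _ N _).mpr
        ⟨0, 1, 2, 3, by omega, by omega, by omega, by omega, by omega, rfl⟩)
    have hA : solution N tree = max 0 (pvMx (pvCA (pvLs N tree) N)) := by
      rw [A_eq_M, M_eq_CA, foldl_maxflip_eq _ _ hCAne]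
    have hB : solution_alt N tree
        = max 0 (pvMx ((PySem.List.pyRange 3 N 1).map (fun i => pvDp (pvLs N tree) 3 i))) := by
      simp only [solution_alt, if_neg (not_lt.mpr h4)]
      rw [← hls]
      rw [B_layers (pvLs N tree) N hlen]
      rfl
    rw [hA, hB, core _ N h4]
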